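-- pv_equiv track=rewrite | github.com/VLaxmiNarayanSharma/DNA_Cryptography | src/intron_handler.py | remove_introns
-- ===== SOURCE A (Python) =====
-- from typing import List, Tuple
--
-- def remove_introns(dna: str, start_sig: str, end_sig: str) -> Tuple[str, List[Tuple[int, int, str]]]:
--     """
--     Removes introns from DNA based on start_sig and end_sig.
--
--     Returns:
--         exons_only (str)
--         intron_list: list of (start_index, end_index, intron_string)
--     """
--
--     exons = []
--     introns = []
--     i = 0
--     n = len(dna)
--
--     while i < n:
--         if dna.startswith(start_sig, i):
--             j = dna.find(end_sig, i + len(start_sig))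
--             if j == -1:
--                 exons.append(dna[i:])
--                 break
--
--             intron_text = dna[i: j + len(end_sig)]
--             introns.append((i, j + len(end_sig), intron_text))
--             i = j + len(end_sig)
--
--         else:
--             exons.append(dna[i])
--             i += 1
--
--     return ''.join(exons), introns
-- ===== SOURCE B (Python) =====
-- def remove_introns(dna, start_sig, end_sig):
--     """Two stages: (1) collect intron intervals with str.find jumps;
--     (2) rebuild the exon string from the gaps between the intervals."""
--     n = len(dna)
--     # stage 1: intron intervals only
--     introns = []
--     i = 0
--     while i < n:
--         k = dna.find(start_sig, i)
--         if k == -1: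
--             break
--         j = dna.find(end_sig, k + len(start_sig))
--         if j == -1:
--             break  # dangling start: it stays in the exon tail
--         e = j + len(end_sig)
--         introns.append((k, e, dna[k:e]))
--         i = e
--     # stage 2: exons are the gaps between intervals plus the tail
--     parts = []
--     prev = 0
--     for (a, e, _) in introns:
--         parts.append(dna[prev:a])
--         prev = e
--     parts.append(dna[prev:])
--     return ''.join(parts), introns
-- ===== Notes on version B (the rewrite author's own statement) =====
-- stated objective: faster
-- what changed: B is a two-stage algorithm: it first collects only the intron intervals by str.find jumps, then rebuilds the exon string from the gaps between consecutive intervals, eliminating A's per-character while loop (a startswith test and one-char append at every index) and its exon accumulator.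
import Mathlib
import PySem

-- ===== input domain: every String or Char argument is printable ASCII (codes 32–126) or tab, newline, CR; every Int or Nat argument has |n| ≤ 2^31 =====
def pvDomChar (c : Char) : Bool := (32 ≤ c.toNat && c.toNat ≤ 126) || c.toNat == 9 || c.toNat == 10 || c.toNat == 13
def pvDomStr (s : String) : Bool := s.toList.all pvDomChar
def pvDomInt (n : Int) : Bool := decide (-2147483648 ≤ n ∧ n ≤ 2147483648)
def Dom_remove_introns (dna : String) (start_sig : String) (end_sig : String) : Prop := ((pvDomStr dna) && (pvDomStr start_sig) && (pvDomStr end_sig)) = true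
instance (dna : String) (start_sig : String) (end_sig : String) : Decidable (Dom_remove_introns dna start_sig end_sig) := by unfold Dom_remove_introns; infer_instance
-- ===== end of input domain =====

-- B replaces A's single per-character loop (exons accumulated one char at a time) by two stages:
-- collect the intron intervals by find-jumps, then rebuild the exon string from the gaps between them.

-- ===== PORT A =====
-- A's while loop; fuel bounds the remaining iterations (each iteration advances i by at least 1 on
-- every input admitted by Pre_, so fuel s.length + 1 is never exhausted there).
def riLoopA (s sig esig : List Char) : Nat → Nat → List (List Char) → List (Int × Int × String) → List (List Char) × List (Int × Int × String)
  | 0, _, ex, intr => (ex, intr)  -- fuel exhausted: unreachable under Pre_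
  | f + 1, i, ex, intr =>
    if i < s.length then
      if PySem.Chars.startswith (List.drop i s) sig then  -- dna.startswith(start_sig, i); exact since 0 ≤ i
        let j := PySem.Chars.findFrom s esig ((i + sig.length : Nat) : Int) none  -- dna.find(end_sig, i + len(start_sig))
        if j = -1 then (ex ++ [List.drop i s], intr)  -- exons.append(dna[i:]); break
        else
          let e := j.toNat + esig.length  -- j + len(end_sig)
          riLoopA s sig esig f e ex
            (intr ++ [((i : Int), (e : Int), String.ofList (PySem.List.slice s (some (i : Int)) (some (e : Int))))])
      else
        match PySem.List.pyGet? s (i : Int) with  -- exons.append(dna[i]); always some, since i < len(dna)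
        | some c => riLoopA s sig esig f (i + 1) (ex ++ [[c]]) intr
        | none => (ex, intr)
    else (ex, intr)

def remove_introns (dna : String) (start_sig : String) (end_sig : String) : String × (List (Int × Int × String)) :=
  let s := dna.toList
  let r := riLoopA s start_sig.toList end_sig.toList (s.length + 1) 0 [] []
  (String.ofList r.1.flatten, r.2)  -- ''.join(exons)

-- ===== PORT B =====
-- Stage 1: collect the intron intervals only (B's first while loop); fuel as above.
def riCollect (s sig esig : List Char) : Nat → Nat → List (Int × Int × String) → List (Int × Int × String)
  | 0, _, acc => acc  -- fuel exhausted: unreachable under Pre_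
  | f + 1, i, acc =>
    if i < s.length then
      let k := PySem.Chars.findFrom s sig ((i : Nat) : Int) none  -- dna.find(start_sig, i)
      if k = -1 then acc  -- break
      else
        let kn := k.toNat
        let j := PySem.Chars.findFrom s esig ((kn + sig.length : Nat) : Int) none  -- dna.find(end_sig, k + len(start_sig))
        if j = -1 then acc  -- dangling start: break, it stays in the exon tail
        else
          let e := j.toNat + esig.length  -- j + len(end_sig)
          riCollect s sig esig f e
            (acc ++ [((kn : Int), (e : Int), String.ofList (PySem.List.slice s (some (kn : Int)) (some (e : Int))))])
    else acc

-- Stage 2: B's for loop over the intervals — each gap dna[prev:a] becomes one part, then dna[prev:].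
def riGaps (s : List Char) : Int → List (Int × Int × String) → List (List Char)
  | prev, [] => [PySem.List.slice s (some prev) none]  -- parts.append(dna[prev:])
  | prev, (a, e, _) :: rest => PySem.List.slice s (some prev) (some a) :: riGaps s e rest

def remove_introns_alt (dna : String) (start_sig : String) (end_sig : String) : String × (List (Int × Int × String)) :=
  let s := dna.toList
  let intr := riCollect s start_sig.toList end_sig.toList (s.length + 1) 0 []
  (String.ofList (riGaps s 0 intr).flatten, intr)  -- ''.join(parts)

-- ===== PRECONDITION & SPEC =====
-- Pre_ excludes exactly the inputs on which A's while loop never terminates (i = j + len(end_sig)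
-- leaves i unchanged forever): both signals empty with a non-empty dna. A returns on all other inputs.
def Pre_remove_introns (dna : String) (start_sig : String) (end_sig : String) : Prop :=
  ¬ (start_sig = "" ∧ end_sig = "" ∧ dna ≠ "")
instance (dna : String) (start_sig : String) (end_sig : String) : Decidable (Pre_remove_introns dna start_sig end_sig) := by
  unfold Pre_remove_introns; infer_instance

def pvWitness_remove_introns : String × String × String := ("xxATGhelloTAAyy", "ATG", "TAA")

def Spec_remove_introns (dna : String) (start_sig : String) (end_sig : String) (out : String × (List (Int × Int × String))) : Prop := out = remove_introns_alt dna start_sig end_sig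
instance (dna : String) (start_sig : String) (end_sig : String) (out : String × (List (Int × Int × String))) : Decidable (Spec_remove_introns dna start_sig end_sig out) := by unfold Spec_remove_introns; infer_instance

-- ===== CLAIM (what is proved, stated in full; the proofs are below) =====
def Claim_equal_remove_introns : Prop := ∀ (dna : String) (start_sig : String) (end_sig : String), Dom_remove_introns dna start_sig end_sig → Pre_remove_introns dna start_sig end_sig → Spec_remove_introns dna start_sig end_sig (remove_introns dna start_sig end_sig)

-- ===== LEMMAS AND PROOFS =====

lemma flatten_map_singleton (l : List Char) : (l.map (fun c => [c])).flatten = l := by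
  induction l with
  | nil => rfl
  | cons a t ih => simp [ih]

lemma flatten_drop_map_singleton (s : List Char) (i : Nat) :
    (List.drop i (List.map (fun c => [c]) s)).flatten = List.drop i s := by
  rw [← List.map_drop]; exact flatten_map_singleton _

lemma riCollect_acc (s sig esig : List Char) :
    ∀ (f i : Nat) (acc : List (Int × Int × String)),
      riCollect s sig esig f i acc = acc ++ riCollect s sig esig f i [] := by
  intro f
  induction f with
  | zero => intro i acc; simp [riCollect]
  | succ f ih =>
    intro i acc
    simp only [riCollect]
    by_cases hin : i < s.length
    · simp only [if_pos hin]
      split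
      · simp
      · split
        · simp
        · rw [ih]
          conv_rhs => rw [ih]
          simp
    · simp [hin]

-- A walks through a region with no start_sig match one character at a time.
lemma riLoopA_walk (s sig esig : List Char) (d : Nat) :
    ∀ (f i : Nat) (ex : List (List Char)) (intr : List (Int × Int × String)),
      i + d ≤ s.length →
      (∀ p, i ≤ p → p < i + d → ¬ sig <+: List.drop p s) →
      riLoopA s sig esig (f + d) i ex intr
        = riLoopA s sig esig f (i + d) (ex ++ ((List.take d (List.drop i s)).map (fun c => [c]))) intr := by
  induction d with
  | zero => intro f i ex intr _ _; simp
  | succ d ih =>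
    intro f i ex intr hlen hno
    have hin : i < s.length := by omega
    have hsw : PySem.Chars.startswith (List.drop i s) sig = false := by
      rw [Bool.eq_false_iff]
      intro h
      exact hno i le_rfl (by omega) ((PySem.Chars.startswith_iff _ _).mp h)
    have hget : PySem.List.pyGet? s ((i : Nat) : Int) = some s[i] := by
      simp [PySem.List.pyGet?_natCast, List.getElem?_eq_getElem hin]
    have hf : f + (d + 1) = (f + d) + 1 := by omega
    rw [hf]
    show riLoopA s sig esig ((f + d) + 1) i ex intr = _
    rw [riLoopA]
    simp only [if_pos hin, hsw, Bool.false_eq_true, if_false, hget]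
    rw [ih f (i + 1) (ex ++ [[s[i]]]) intr (by omega)
      (fun p hp1 hp2 => hno p (by omega) (by omega))]
    have h2 : i + 1 + d = i + (d + 1) := by omega
    rw [h2]
    have hlist : (ex ++ [[s[i]]]) ++ (List.take d (List.drop (i+1) s)).map (fun c => [c])
        = ex ++ (List.take (d+1) (List.drop i s)).map (fun c => [c]) := by
      conv_rhs => rw [List.drop_eq_getElem_cons hin, List.take_succ_cons, List.map_cons]
      simp only [List.append_assoc, List.cons_append, List.nil_append]
    rw [hlist]

-- main alignment: with enough fuel, A's loop from position i produces exactly the introns of B's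
-- stage 1 from i, and its joined exons are exactly B's stage-2 gaps of that interval list.
lemma riLoop_eq (s sig esig : List Char) (hnd : sig ≠ [] ∨ esig ≠ []) :
    ∀ (m : Nat), ∀ (i f1 f2 : Nat) (ex : List (List Char)) (intr : List (Int × Int × String)),
      i ≤ s.length → s.length - i ≤ m → s.length - i < f1 → s.length - i < f2 →
      (riLoopA s sig esig f1 i ex intr).1.flatten
        = ex.flatten ++ (riGaps s ((i : Nat) : Int) (riCollect s sig esig f2 i [])).flatten
      ∧ (riLoopA s sig esig f1 i ex intr).2 = intr ++ riCollect s sig esig f2 i [] := by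
  intro m
  induction m with
  | zero =>
    intro i f1 f2 ex intr hi hm hf1 hf2
    obtain ⟨g1, rfl⟩ : ∃ g, f1 = g + 1 := ⟨f1 - 1, by omega⟩
    obtain ⟨g2, rfl⟩ : ∃ g, f2 = g + 1 := ⟨f2 - 1, by omega⟩
    have hin : ¬ i < s.length := by omega
    simp only [riLoopA, riCollect, if_neg hin]
    have hdrop : List.drop i s = [] := List.drop_eq_nil_of_le (by omega)
    simp [riGaps, PySem.List.slice_from_natCast, hdrop]
  | succ m ih =>
    intro i f1 f2 ex intr hi hm hf1 hf2
    obtain ⟨g1, rfl⟩ : ∃ g, f1 = g + 1 := ⟨f1 - 1, by omega⟩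
    obtain ⟨g2, rfl⟩ : ∃ g, f2 = g + 1 := ⟨f2 - 1, by omega⟩
    by_cases hin : i < s.length
    case neg =>
      simp only [riLoopA, riCollect, if_neg hin]
      have hdrop : List.drop i s = [] := List.drop_eq_nil_of_le (by omega)
      simp [riGaps, PySem.List.slice_from_natCast, hdrop]
    case pos =>
    have hk_le : i ≤ s.length := le_of_lt hin
    by_cases hK : PySem.Chars.findFrom s sig ((i : Nat) : Int) none = -1
    · -- no start_sig occurrence from i on: A walks to the end, B's stage 1 stops; gap = dna[i:]
      have hninf : ¬ sig <:+: List.drop i s :=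
        (PySem.Chars.findFrom_natCast_eq_neg_one_iff s sig i hk_le).mp hK
      have hno : ∀ p, i ≤ p → ¬ sig <+: List.drop p s := by
        intro p hp hpre
        have h2 : List.drop (p - i) (List.drop i s) = List.drop p s := by
          rw [List.drop_drop]; congr 1; omega
        have hpre' : sig <+: List.drop (p - i) (List.drop i s) := by rw [h2]; exact hpre
        exact hninf (hpre'.isInfix.trans (List.drop_suffix _ _).isInfix)
      have hfa : g1 + 1 = (g1 + 1 - (s.length - i)) + (s.length - i) := by omega
      rw [hfa, riLoopA_walk s sig esig (s.length - i) _ i ex intr (by omega)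
        (fun p hp1 _ => hno p hp1)]
      have hie : i + (s.length - i) = s.length := by omega
      rw [hie]
      obtain ⟨r1, hr1⟩ : ∃ r, g1 + 1 - (s.length - i) = r + 1 := ⟨g1 - (s.length - i), by omega⟩
      rw [hr1]
      have htk : List.take (s.length - i) (List.drop i s) = List.drop i s :=
        List.take_of_length_le (by simp)
      rw [htk]
      simp only [riLoopA, riCollect, if_neg (lt_irrefl s.length), if_pos hin, hK]
      constructor
      · simp [riGaps, PySem.List.slice_from_natCast, flatten_drop_map_singleton]
      · simp
    · -- next start_sig occurrence at K.toNat
      obtain ⟨hiK, hpreK, hminK⟩ := PySem.Chars.findFrom_natCast_spec s sig i hk_le hK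
      have hKval := PySem.Chars.findFrom_natCast s sig i hk_le
      have hfle := PySem.Chars.find_le_length (List.drop i s) sig
      have hfge := PySem.Chars.neg_one_le_find (List.drop i s) sig
      set K := PySem.Chars.findFrom s sig ((i : Nat) : Int) none with hKdef
      have hf : ¬ PySem.Chars.find (List.drop i s) sig = -1 := by
        intro h; rw [hKval, if_pos h] at hK; exact hK rfl
      rw [if_neg hf] at hKval
      have hdlen : (List.drop i s).length = s.length - i := List.length_drop
      rw [hdlen] at hfle
      have hKle : K.toNat ≤ s.length := by omega
      have hsig_le : K.toNat + sig.length ≤ s.length := by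
        have h1 := hpreK.length_le
        rw [List.length_drop] at h1
        omega
      have hkn : K.toNat < s.length := by
        rcases eq_or_ne sig [] with h | h
        · rw [h, PySem.Chars.find_nil] at hKval; omega
        · have h1 : 1 ≤ sig.length := List.length_pos_of_ne_nil h
          omega
      have hK0 : (0 : Int) ≤ K := le_trans (Int.natCast_nonneg i) hiK
      have hiKn : i ≤ K.toNat := (Int.le_toNat hK0).mpr hiK
      have hfa : g1 + 1 = (g1 + 1 - (K.toNat - i)) + (K.toNat - i) := by omega
      rw [hfa, riLoopA_walk s sig esig (K.toNat - i) _ i ex intr (by omega)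
        (fun p hp1 hp2 => hminK p hp1 (by omega))]
      have hie : i + (K.toNat - i) = K.toNat := by omega
      rw [hie]
      obtain ⟨r1, hr1⟩ : ∃ r, g1 + 1 - (K.toNat - i) = r + 1 := ⟨g1 - (K.toNat - i), by omega⟩
      rw [hr1]
      have hsw : PySem.Chars.startswith (List.drop K.toNat s) sig = true :=
        (PySem.Chars.startswith_iff _ _).mpr hpreK
      simp only [riLoopA, riCollect, if_pos hkn, if_pos hin, hsw, if_true]
      rw [← hKdef, if_neg hK]
      have htake : PySem.List.slice s (some ((i : Nat) : Int)) (some ((K.toNat : Nat) : Int))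
          = (List.drop i s).take (K.toNat - i) := PySem.List.slice_natCast s i K.toNat
      by_cases hJ : PySem.Chars.findFrom s esig ((K.toNat + sig.length : Nat) : Int) none = -1
      · -- dangling start: A emits dna[K:]; B's stage 1 stops, the single gap is dna[i:]
        simp only [if_pos hJ]
        refine ⟨?_, by simp⟩
        simp only [riGaps, List.flatten_append, List.flatten_cons, List.flatten_nil,
          flatten_map_singleton, List.append_nil, List.append_assoc]
        rw [PySem.List.slice_from_natCast]
        have hdk : List.drop K.toNat s = List.drop (K.toNat - i) (List.drop i s) := by
          rw [List.drop_drop]; congr 1; omega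
        rw [hdk, List.take_append_drop]
      · simp only [if_neg hJ]
        obtain ⟨hJ1, hJpre, -⟩ := PySem.Chars.findFrom_natCast_spec s esig (K.toNat + sig.length) hsig_le hJ
        have hJval := PySem.Chars.findFrom_natCast s esig (K.toNat + sig.length) hsig_le
        have hjf : ¬ PySem.Chars.find (List.drop (K.toNat + sig.length) s) esig = -1 := by
          intro h; rw [if_pos h] at hJval; exact hJ hJval
        rw [if_neg hjf] at hJval
        have hjfle := PySem.Chars.find_le_length (List.drop (K.toNat + sig.length) s) esig
        rw [List.length_drop] at hjfle
        have h1 := hJpre.length_le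
        rw [List.length_drop] at h1
        have hJle : (PySem.Chars.findFrom s esig ((K.toNat + sig.length : Nat) : Int) none).toNat + esig.length ≤ s.length := by
          omega
        have hJgt : K.toNat < (PySem.Chars.findFrom s esig ((K.toNat + sig.length : Nat) : Int) none).toNat + esig.length := by
          rcases eq_or_ne esig [] with h | h
          · rcases hnd with hs | hs
            · have hl1 : 1 ≤ sig.length := List.length_pos_of_ne_nil hs
              omega
            · exact absurd h hs
          · have hl1 : 1 ≤ esig.length := List.length_pos_of_ne_nil h
            omega
        set E := (PySem.Chars.findFrom s esig ((K.toNat + sig.length : Nat) : Int) none).toNat + esig.length with hEdef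
        obtain ⟨ihA, ihB⟩ := ih E r1 g2 (ex ++ (List.take (K.toNat - i) (List.drop i s)).map (fun c => [c]))
          (intr ++ [((K.toNat : Int), (E : Int), String.ofList (PySem.List.slice s (some (K.toNat : Int)) (some (E : Int))))])
          (by omega) (by omega) (by omega) (by omega)
        rw [riCollect_acc s sig esig g2 E]
        constructor
        · rw [ihA]
          simp only [List.nil_append, List.singleton_append, riGaps, List.flatten_cons,
            List.flatten_append, flatten_map_singleton, htake, List.append_assoc]
        · rw [ihB]
          simp

-- ===== VERDICT (by name: the statement is the Claim_ definition above) =====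
theorem remove_introns_spec : Claim_equal_remove_introns := by
  intro dna start_sig end_sig _ hpre
  unfold Spec_remove_introns
  by_cases hd : dna = ""
  · subst hd; rfl
  · have hnd : start_sig.toList ≠ [] ∨ end_sig.toList ≠ [] := by
      by_cases h1 : start_sig = ""
      · by_cases h2 : end_sig = ""
        · exact absurd ⟨h1, h2, hd⟩ hpre
        · exact Or.inr (fun h => h2 (String.toList_eq_nil_iff.mp h))
      · exact Or.inl (fun h => h1 (String.toList_eq_nil_iff.mp h))
    obtain ⟨h1, h2⟩ := riLoop_eq dna.toList start_sig.toList end_sig.toList hnd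
      dna.toList.length 0 (dna.toList.length + 1) (dna.toList.length + 1) [] []
      (by omega) (by omega) (by omega) (by omega)
    simp only [remove_introns, remove_introns_alt]
    refine Prod.ext (congrArg String.ofList ?_) h2
    rw [h1]
    simp
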